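-- pv_equiv track=rewrite | github.com/n0skii/hackerrank | angry_children.py | angryChildren
-- ===== SOURCE A (Python) =====
-- def angryChildren(k, packets):
--     packets.sort()
--
--     initialArr = packets[:k]
--     currentSum = 0
--     overallSum = 0
--     for i, elem in enumerate(initialArr):
--         currentSum += (2 * i - k + 1) * elem
--         overallSum += elem
--
--     minSum = currentSum
--     for i in range(len(packets) - k):
--         currentSum += (k - 1) * packets[i]
--         overallSum -= packets[i]
--         currentSum -= 2 * overallSum
--         currentSum += (k - 1) * packets[i + k]
--         overallSum += packets[i + k]
--
--         minSum = currentSum if currentSum < minSum else minSum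
--
--     return minSum
-- ===== SOURCE B (Python) =====
-- def angryChildren(k, packets):
--     packets.sort()
--     n = len(packets)
--     S = [0]
--     W = [0]
--     for i, v in enumerate(packets):
--         S.append(S[-1] + v)
--         W.append(W[-1] + i * v)
--     return min(2 * (W[min(j + k, n)] - W[j])
--                - (2 * j + k - 1) * (S[min(j + k, n)] - S[j])
--                for j in range(max(n - k, 0) + 1))
-- ===== Notes on version B (the rewrite author's own statement) =====
-- stated objective: alternative
-- what changed: B replaces A's incremental currentSum/overallSum sliding-window updates by two prefix-sum arrays (values and index-weighted values) built once, from which each (end-clamped) window's cost is a closed-form O(1) query, taking the min over all window starts.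
import Mathlib
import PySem

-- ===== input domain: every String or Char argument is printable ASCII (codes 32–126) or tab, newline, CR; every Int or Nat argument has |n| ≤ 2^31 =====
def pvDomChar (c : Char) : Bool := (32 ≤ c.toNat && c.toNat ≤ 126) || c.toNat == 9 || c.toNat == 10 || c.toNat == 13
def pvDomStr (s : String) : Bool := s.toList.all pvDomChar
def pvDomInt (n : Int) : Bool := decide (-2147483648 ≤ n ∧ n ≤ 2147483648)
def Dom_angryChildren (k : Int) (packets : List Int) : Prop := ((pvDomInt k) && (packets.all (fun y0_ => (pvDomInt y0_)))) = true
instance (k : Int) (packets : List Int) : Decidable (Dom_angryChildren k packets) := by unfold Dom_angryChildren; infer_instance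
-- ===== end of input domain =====

-- B computes each window's unfairness as a closed-form query over two prefix-sum
-- arrays instead of A's incremental sliding-window updates (objective: alternative).
-- A sorts `packets` in place (B does the same); the equivalence proved is about the return value.

-- ===== PORT A =====
def angryChildren (k : Int) (packets : List Int) : Int :=
  let packets := PySem.List.sorted packets (fun x => x) false
  let initialArr := PySem.List.slice packets none (some k)
  let cs : Int × Int :=
    (PySem.List.enumerate initialArr 0).foldl
      (fun (st : Int × Int) ie => (st.1 + (2 * ie.1 - k + 1) * ie.2, st.2 + ie.2)) (0, 0)
  let res : Int × Int × Int :=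
    (PySem.List.pyRange 0 ((packets.length : Int) - k) 1).foldl
      (fun (st : Int × Int × Int) i =>
        let c1 := st.1 + (k - 1) * PySem.List.pyGetD packets i 0
        let o1 := st.2.1 - PySem.List.pyGetD packets i 0
        let c2 := c1 - 2 * o1
        let c3 := c2 + (k - 1) * PySem.List.pyGetD packets (i + k) 0
        let o2 := o1 + PySem.List.pyGetD packets (i + k) 0
        (c3, o2, if c3 < st.2.2 then c3 else st.2.2))
      (cs.1, cs.2, cs.1)
  res.2.2

-- ===== PORT B =====
def angryChildren_alt (k : Int) (packets : List Int) : Int :=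
  let s := PySem.List.sorted packets (fun x => x) false
  let n : Int := (s.length : Int)
  let SW : List Int × List Int :=
    (PySem.List.enumerate s 0).foldl
      (fun (p : List Int × List Int) iv =>
        (p.1 ++ [PySem.List.pyGetD p.1 (-1) 0 + iv.2],
         p.2 ++ [PySem.List.pyGetD p.2 (-1) 0 + iv.1 * iv.2])) ([0], [0])
  let costs :=
    (PySem.List.pyRange 0 (max (n - k) 0 + 1) 1).map (fun j =>
      2 * (PySem.List.pyGetD SW.2 (min (j + k) n) 0 - PySem.List.pyGetD SW.2 j 0)
      - (2 * j + k - 1) * (PySem.List.pyGetD SW.1 (min (j + k) n) 0 - PySem.List.pyGetD SW.1 j 0))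
  (PySem.List.min? costs (fun x => x)).getD 0

-- ===== PRECONDITION & SPEC =====
-- Pre_ excludes exactly k < 0, where A raises IndexError (packets[i] past the end
-- inside the loop range(len(packets) - k)).
def Pre_angryChildren (k : Int) (packets : List Int) : Prop := 0 ≤ k
instance (k : Int) (packets : List Int) : Decidable (Pre_angryChildren k packets) := by
  unfold Pre_angryChildren; infer_instance
def pvWitness_angryChildren : Int × List Int := (2, [4, 1, 3])

def Spec_angryChildren (k : Int) (packets : List Int) (out : Int) : Prop := out = angryChildren_alt k packets
instance (k : Int) (packets : List Int) (out : Int) : Decidable (Spec_angryChildren k packets out) := by unfold Spec_angryChildren; infer_instance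

-- ===== CLAIM (what is proved, stated in full; the proofs are below) =====
def Claim_equal_angryChildren : Prop := ∀ (k : Int) (packets : List Int), Dom_angryChildren k packets → Pre_angryChildren k packets → Spec_angryChildren k packets (angryChildren k packets)

-- ===== LEMMAS AND PROOFS =====

-- prefix sum of values: Ssum s j = s[0] + … + s[j-1]
def Ssum (s : List Int) : Nat → Int
  | 0 => 0
  | j+1 => Ssum s j + s.getD j 0

-- index-weighted prefix sum: Wsum s j = 0*s[0] + … + (j-1)*s[j-1]
def Wsum (s : List Int) : Nat → Int
  | 0 => 0
  | j+1 => Wsum s j + (j : Int) * s.getD j 0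

-- cost of the window of width kn starting at j
def cost (s : List Int) (kn : Nat) (j : Nat) : Int :=
  2 * (Wsum s (j+kn) - Wsum s j)
  - (2*(j:Int) + (kn:Int) - 1) * (Ssum s (j+kn) - Ssum s j)

-- running minimum of cost over window starts 0..m
def Rmin (s : List Int) (kn : Nat) : Nat → Int
  | 0 => cost s kn 0
  | m+1 => min (Rmin s kn m) (cost s kn (m+1))

theorem Ssum_take (s : List Int) (kn : Nat) :
    ∀ m, m ≤ kn → Ssum (s.take kn) m = Ssum s m := by
  intro m
  induction m with
  | zero => intro _; rfl
  | succ m ih =>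
      intro h
      have hm : m < kn := by omega
      simp [Ssum, ih (by omega), List.getD, hm]

theorem Wsum_take (s : List Int) (kn : Nat) :
    ∀ m, m ≤ kn → Wsum (s.take kn) m = Wsum s m := by
  intro m
  induction m with
  | zero => intro _; rfl
  | succ m ih =>
      intro h
      have hm : m < kn := by omega
      simp [Wsum, ih (by omega), List.getD, hm]

-- A's initial loop
theorem lemA_init (kk : Int) (l : List Int) :
    ∀ m : Nat, m ≤ l.length →
    (((PySem.List.pyRange 0 (m : Int) 1).map (fun j => (j, PySem.List.pyGetD l j 0))).foldl
      (fun (st : Int × Int) ie => (st.1 + (2 * ie.1 - kk + 1) * ie.2, st.2 + ie.2)) (0, 0))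
    = (2 * Wsum l m + (1 - kk) * Ssum l m, Ssum l m) := by
  intro m
  induction m with
  | zero =>
      intro _
      simp [PySem.List.pyRange_one_eq_nil, Ssum, Wsum]
  | succ m ih =>
      intro h
      have hsplit : PySem.List.pyRange 0 ((m + 1 : Nat) : Int) 1
          = PySem.List.pyRange 0 (m : Int) 1 ++ [(m : Int)] := by
        push_cast
        exact PySem.List.pyRange_one_succ_right (by positivity)
      rw [hsplit, List.map_append, List.foldl_append, ih (by omega)]
      simp [Ssum, Wsum, PySem.List.pyGetD_natCast]
      ring_nf

-- the sliding-window algebraic identity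
theorem cost_step (s : List Int) (kn m : Nat) :
    cost s kn (m+1)
      = cost s kn m + ((kn:Int) - 1) * s.getD m 0
        - 2 * ((Ssum s (m+kn) - Ssum s m) - s.getD m 0)
        + ((kn:Int) - 1) * s.getD (m+kn) 0 := by
  have h1 : m + 1 + kn = (m + kn) + 1 := by omega
  unfold cost
  rw [h1]
  simp only [Ssum, Wsum]
  push_cast
  ring

-- A's main loop
theorem lemA_main (s : List Int) (kn : Nat) :
    ∀ m : Nat,
    ((PySem.List.pyRange 0 (m : Int) 1).foldl
      (fun (st : Int × Int × Int) i =>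
        let c1 := st.1 + ((kn:Int) - 1) * PySem.List.pyGetD s i 0
        let o1 := st.2.1 - PySem.List.pyGetD s i 0
        let c2 := c1 - 2 * o1
        let c3 := c2 + ((kn:Int) - 1) * PySem.List.pyGetD s (i + (kn:Int)) 0
        let o2 := o1 + PySem.List.pyGetD s (i + (kn:Int)) 0
        (c3, o2, if c3 < st.2.2 then c3 else st.2.2))
      (cost s kn 0, Ssum s kn, cost s kn 0))
    = (cost s kn m, Ssum s (m+kn) - Ssum s m, Rmin s kn m) := by
  intro m
  induction m with
  | zero =>
      simp [PySem.List.pyRange_one_eq_nil, Ssum, Rmin]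
  | succ m ih =>
      have hsplit : PySem.List.pyRange 0 ((m + 1 : Nat) : Int) 1
          = PySem.List.pyRange 0 (m : Int) 1 ++ [(m : Int)] := by
        push_cast
        exact PySem.List.pyRange_one_succ_right (by positivity)
      rw [hsplit, List.foldl_append, ih]
      have hg2 : PySem.List.pyGetD s ((m:Int) + (kn:Int)) 0 = s.getD (m+kn) 0 := by
        rw [← Nat.cast_add]; exact PySem.List.pyGetD_natCast s (m+kn) 0
      have h1 : m + 1 + kn = (m + kn) + 1 := by omega
      simp only [List.foldl_cons, List.foldl_nil, hg2, PySem.List.pyGetD_natCast,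
        Rmin, h1, Ssum, Prod.mk.injEq]
      rw [cost_step s kn m]
      refine ⟨by ring, by ring, ?_⟩
      simp only [min_def]
      split_ifs <;> linarith

-- B's prefix arrays
def preS (s : List Int) : Nat → List Int
  | 0 => [0]
  | m+1 => preS s m ++ [Ssum s (m+1)]

def preW (s : List Int) : Nat → List Int
  | 0 => [0]
  | m+1 => preW s m ++ [Wsum s (m+1)]

theorem preS_eq (s : List Int) : ∀ m, preS s m = (List.range (m+1)).map (Ssum s) := by
  intro m
  induction m with
  | zero => simp [preS, Ssum]
  | succ m ih => rw [List.range_succ, List.map_append]; simp [preS, ih]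

theorem preW_eq (s : List Int) : ∀ m, preW s m = (List.range (m+1)).map (Wsum s) := by
  intro m
  induction m with
  | zero => simp [preW, Wsum]
  | succ m ih => rw [List.range_succ, List.map_append]; simp [preW, ih]

theorem lemB_build (s : List Int) :
    ∀ m : Nat,
    (((PySem.List.pyRange 0 (m : Int) 1).map (fun j => (j, PySem.List.pyGetD s j 0))).foldl
      (fun (p : List Int × List Int) iv =>
        (p.1 ++ [PySem.List.pyGetD p.1 (-1) 0 + iv.2],
         p.2 ++ [PySem.List.pyGetD p.2 (-1) 0 + iv.1 * iv.2])) ([0], [0]))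
    = (preS s m, preW s m) := by
  intro m
  induction m with
  | zero => simp [PySem.List.pyRange_one_eq_nil, preS, preW]
  | succ m ih =>
      have hsplit : PySem.List.pyRange 0 ((m + 1 : Nat) : Int) 1
          = PySem.List.pyRange 0 (m : Int) 1 ++ [(m : Int)] := by
        push_cast
        exact PySem.List.pyRange_one_succ_right (by positivity)
      have hlS : PySem.List.pyGetD (preS s m) (-1) 0 = Ssum s m := by
        cases m with
        | zero => simp [preS, Ssum, PySem.List.pyGetD, PySem.List.pyGet?, PySem.List.pyIdx?]
        | succ m => exact PySem.List.pyGetD_neg_one_append_singleton _ _ _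
      have hlW : PySem.List.pyGetD (preW s m) (-1) 0 = Wsum s m := by
        cases m with
        | zero => simp [preW, Wsum, PySem.List.pyGetD, PySem.List.pyGet?, PySem.List.pyIdx?]
        | succ m => exact PySem.List.pyGetD_neg_one_append_singleton _ _ _
      rw [hsplit, List.map_append, List.foldl_append, ih]
      simp only [List.map_cons, List.map_nil, List.foldl_cons, List.foldl_nil,
        hlS, hlW, PySem.List.pyGetD_natCast, preS, preW, Ssum, Wsum]

theorem lemB_min (s : List Int) (kn : Nat) :
    ∀ m : Nat,
    (((List.range m).map (fun i => cost s kn (i+1))).foldl min (cost s kn 0)) = Rmin s kn m := by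
  intro m
  induction m with
  | zero => rfl
  | succ m ih =>
      rw [List.range_succ, List.map_append, List.foldl_append, ih]
      rfl

theorem pyGetD_map_range (f : Nat → Int) (N i : Nat) (h : i < N) :
    PySem.List.pyGetD ((List.range N).map f) (i : Int) 0 = f i := by
  simp [PySem.List.pyGetD_natCast, List.getD, h]

-- A's value: Rmin over all window starts
theorem lemA (kn : Nat) (packets : List Int) (hkn : kn ≤ packets.length) :
    angryChildren (kn : Int) packets
      = Rmin (PySem.List.sorted packets (fun x => x) false) kn (packets.length - kn) := by
  unfold angryChildren
  set s := PySem.List.sorted packets (fun x => x) false with hs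
  have hlen : s.length = packets.length := by
    rw [hs]; exact (PySem.List.sorted_perm packets (fun x => x) false).length_eq
  have hkns : kn ≤ s.length := by omega
  have htk : PySem.List.slice s none (some (kn : Int)) = s.take kn :=
    PySem.List.slice_to_natCast s kn
  have henum : PySem.List.enumerate (s.take kn) 0
      = (PySem.List.pyRange 0 ((kn : Nat) : Int) 1).map
          (fun j => (j, PySem.List.pyGetD (s.take kn) j 0)) := by
    have := PySem.List.enumerate_eq_map_pyRange (s.take kn) (0 : Int)
    simpa [List.length_take, Nat.min_eq_left hkns] using this
  have hcs := lemA_init ((kn : Nat) : Int) (s.take kn) kn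
    (by simp [List.length_take, Nat.min_eq_left hkns])
  have hcost0 : cost s kn 0 = 2 * Wsum s kn + (1 - ((kn:Nat) : Int)) * Ssum s kn := by
    simp [cost, Ssum, Wsum]; ring
  have hrange : (s.length : Int) - ((kn:Nat) : Int) = (((s.length - kn : Nat)) : Int) := by
    omega
  simp only [htk, henum, hcs, Ssum_take s kn kn le_rfl, Wsum_take s kn kn le_rfl,
    hrange, ← hcost0]
  rw [lemA_main s kn (s.length - kn)]
  rw [hlen]

-- B's value: the same Rmin
theorem lemB (kn : Nat) (packets : List Int) (hkn : kn ≤ packets.length) :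
    angryChildren_alt (kn : Int) packets
      = Rmin (PySem.List.sorted packets (fun x => x) false) kn (packets.length - kn) := by
  unfold angryChildren_alt
  dsimp only
  set s := PySem.List.sorted packets (fun x => x) false with hs
  have hlen : s.length = packets.length := by
    rw [hs]; exact (PySem.List.sorted_perm packets (fun x => x) false).length_eq
  have hkns : kn ≤ s.length := by omega
  have henum : PySem.List.enumerate s 0
      = (PySem.List.pyRange 0 ((s.length : Nat) : Int) 1).map
          (fun j => (j, PySem.List.pyGetD s j 0)) := by
    simpa using PySem.List.enumerate_eq_map_pyRange s (0 : Int)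
  have hmax : max ((s.length : Int) - ((kn:Nat) : Int)) 0 + 1 = (((s.length - kn + 1 : Nat)) : Int) := by
    omega
  rw [henum, lemB_build s s.length, hmax]
  simp only [preS_eq, preW_eq]
  have hmapeq : (PySem.List.pyRange 0 (((s.length - kn + 1 : Nat)) : Int) 1).map (fun j =>
      2 * (PySem.List.pyGetD ((List.range (s.length+1)).map (Wsum s)) (min (j + ((kn:Nat):Int)) (s.length : Int)) 0
           - PySem.List.pyGetD ((List.range (s.length+1)).map (Wsum s)) j 0)
      - (2 * j + ((kn:Nat):Int) - 1) *
          (PySem.List.pyGetD ((List.range (s.length+1)).map (Ssum s)) (min (j + ((kn:Nat):Int)) (s.length : Int)) 0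
           - PySem.List.pyGetD ((List.range (s.length+1)).map (Ssum s)) j 0))
      = (List.range (s.length - kn + 1)).map (fun j => cost s kn j) := by
    rw [PySem.List.pyRange_one]
    simp only [sub_zero, Int.toNat_natCast, List.map_map]
    refine List.map_congr_left ?_
    intro j hj
    have hj' : j < s.length - kn + 1 := List.mem_range.mp hj
    have hja : j + kn < s.length + 1 := by omega
    have hjb : j < s.length + 1 := by omega
    have hmin : min ((j : Int) + ((kn:Nat) : Int)) (s.length : Int) = (((j + kn : Nat)) : Int) := by
      omega
    simp only [Function.comp_apply, zero_add, hmin,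
      pyGetD_map_range _ _ _ hja, pyGetD_map_range _ _ _ hjb]
    unfold cost
    ring
  rw [hmapeq]
  have hsucc : s.length - kn + 1 = (s.length - kn) + 1 := rfl
  rw [hsucc, List.range_succ_eq_map, List.map_cons, PySem.List.min?_id_cons]
  simp only [Option.getD_some, List.map_map]
  have hcomp : ((fun j => cost s kn j) ∘ Nat.succ) = (fun i => cost s kn (i+1)) := by
    funext i; simp [Function.comp, Nat.succ_eq_add_one]
  rw [hcomp, hlen]
  exact lemB_min s kn (packets.length - kn)

-- A's value when k exceeds the list length: the single truncated window
theorem lemA_big (kn : Nat) (packets : List Int) (hkn : packets.length < kn) :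
    angryChildren (kn : Int) packets
      = 2 * Wsum (PySem.List.sorted packets (fun x => x) false) packets.length
        - ((kn : Int) - 1) * Ssum (PySem.List.sorted packets (fun x => x) false) packets.length := by
  unfold angryChildren
  dsimp only
  set s := PySem.List.sorted packets (fun x => x) false with hs
  have hlen : s.length = packets.length := by
    rw [hs]; exact (PySem.List.sorted_perm packets (fun x => x) false).length_eq
  have htk : PySem.List.slice s none (some (kn : Int)) = s := by
    rw [PySem.List.slice_to_natCast, List.take_of_length_le (by omega)]
  have henum : PySem.List.enumerate s 0
      = (PySem.List.pyRange 0 ((s.length : Nat) : Int) 1).map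
          (fun j => (j, PySem.List.pyGetD s j 0)) := by
    simpa using PySem.List.enumerate_eq_map_pyRange s (0 : Int)
  have hnil : PySem.List.pyRange 0 ((s.length : Int) - ((kn:Nat) : Int)) 1 = [] :=
    PySem.List.pyRange_one_eq_nil (by omega)
  rw [htk, henum, lemA_init ((kn:Nat) : Int) s s.length le_rfl, hnil]
  simp only [List.foldl_nil, hlen]
  ring

-- B's value when k exceeds the list length: the single clamped window
theorem lemB_big (kn : Nat) (packets : List Int) (hkn : packets.length < kn) :
    angryChildren_alt (kn : Int) packets
      = 2 * Wsum (PySem.List.sorted packets (fun x => x) false) packets.length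
        - ((kn : Int) - 1) * Ssum (PySem.List.sorted packets (fun x => x) false) packets.length := by
  unfold angryChildren_alt
  dsimp only
  set s := PySem.List.sorted packets (fun x => x) false with hs
  have hlen : s.length = packets.length := by
    rw [hs]; exact (PySem.List.sorted_perm packets (fun x => x) false).length_eq
  have henum : PySem.List.enumerate s 0
      = (PySem.List.pyRange 0 ((s.length : Nat) : Int) 1).map
          (fun j => (j, PySem.List.pyGetD s j 0)) := by
    simpa using PySem.List.enumerate_eq_map_pyRange s (0 : Int)
  have hmax : max ((s.length : Int) - ((kn:Nat) : Int)) 0 + 1 = (0 : Int) + 1 := by omega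
  rw [henum, lemB_build s s.length, hmax, PySem.List.pyRange_one_singleton]
  simp only [preS_eq, preW_eq, List.map_cons, List.map_nil]
  have hmin : min ((0 : Int) + ((kn:Nat) : Int)) (s.length : Int) = ((s.length : Nat) : Int) := by
    omega
  have h0 : PySem.List.pyGetD ((List.range (s.length+1)).map (Ssum s)) (0 : Int) 0 = Ssum s 0 := by
    have := pyGetD_map_range (Ssum s) (s.length+1) 0 (by omega)
    simpa using this
  have h0w : PySem.List.pyGetD ((List.range (s.length+1)).map (Wsum s)) (0 : Int) 0 = Wsum s 0 := by
    have := pyGetD_map_range (Wsum s) (s.length+1) 0 (by omega)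
    simpa using this
  rw [hmin]
  simp only [h0, h0w, pyGetD_map_range _ _ _ (Nat.lt_succ_self s.length),
    PySem.List.min?_id_cons, List.foldl_nil, Option.getD_some]
  simp only [Ssum, Wsum, hlen]
  ring

-- ===== VERDICT (by name: the statement is the Claim_ definition above) =====
theorem angryChildren_spec : Claim_equal_angryChildren := by
  intro k packets _ hpre
  have hk0 : 0 ≤ k := hpre
  obtain ⟨kn, rfl⟩ : ∃ kn : Nat, k = (kn : Int) := ⟨k.toNat, (Int.toNat_of_nonneg hk0).symm⟩
  unfold Spec_angryChildren
  by_cases hle : kn ≤ packets.length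
  · rw [lemA kn packets hle, lemB kn packets hle]
  · have hgt : packets.length < kn := by omega
    rw [lemA_big kn packets hgt, lemB_big kn packets hgt]
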